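-- pv_equiv track=rewrite | github.com/iNaneek/2048 | main.py | shift
-- ===== SOURCE A (Python) =====
-- def shift(shiftRow):
--     #this function takes a 4 integer row and takes out all 0s and then adds the 0s again
--     #for example: input[0,2,0,2] and get an output of [2,2,0,0]
--     #this is neccissary for the next function
--     shiftRowReturn = [] #makes a second list used to add elements in the new order
--     blanks = 0 #acts as a counter and re adds this many 0s
--     for i in range(4):
--         if shiftRow[i] == 0: blanks = blanks + 1
--         else: shiftRowReturn.append(shiftRow[i])
--     for i in range(blanks):shiftRowReturn.append(0)
--     return shiftRowReturn
-- ===== SOURCE B (Python) =====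
-- def shift(shiftRow):
--     # stable sort of the first four entries: nonzero (key False) first, zeros (key True) last
--     return sorted(shiftRow[:4], key=lambda x: x == 0)
-- ===== Notes on version B (the rewrite author's own statement) =====
-- stated objective: idiomatic
-- what changed: Replaced the two-pass count-and-repad loop with a one-line stable sort of the first four entries keyed on being zero, which keeps nonzero entries in order and moves zeros to the end.
import Mathlib
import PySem

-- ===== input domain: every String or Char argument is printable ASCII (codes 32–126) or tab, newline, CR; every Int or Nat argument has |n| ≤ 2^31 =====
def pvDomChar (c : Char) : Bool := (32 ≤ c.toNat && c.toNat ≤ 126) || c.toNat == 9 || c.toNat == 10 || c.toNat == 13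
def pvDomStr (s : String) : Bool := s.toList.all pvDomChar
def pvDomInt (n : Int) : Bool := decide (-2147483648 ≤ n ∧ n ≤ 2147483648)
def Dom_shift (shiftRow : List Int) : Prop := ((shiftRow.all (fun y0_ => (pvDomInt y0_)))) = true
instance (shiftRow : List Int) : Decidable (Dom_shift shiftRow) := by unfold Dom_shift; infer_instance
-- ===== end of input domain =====

-- B replaces A's count-and-repad loops with a stable sort of the first four entries keyed on being zero (idiomatic, not faster).


-- ===== PORT A =====
def shift (shiftRow : List Int) : List Int :=
  -- shiftRowReturn = [], blanks = 0; for i in range(4): …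
  let st := (PySem.List.pyRange 0 4 1).foldl
    (fun (p : List Int × Int) i =>
      if PySem.List.pyGetD shiftRow i 0 == 0 then (p.1, p.2 + 1)
      else (p.1 ++ [PySem.List.pyGetD shiftRow i 0], p.2))
    ([], 0)
  -- for i in range(blanks): shiftRowReturn.append(0)
  (PySem.List.pyRange 0 st.2 1).foldl (fun acc _ => acc ++ [(0 : Int)]) st.1

-- ===== PORT B =====
def shift_alt (shiftRow : List Int) : List Int :=
  PySem.List.sorted (PySem.List.slice shiftRow none (some 4)) (fun x => decide (x = 0)) false

-- ===== PRECONDITION & SPEC =====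
-- Pre_ excludes rows shorter than 4, on which A raises IndexError.
def Pre_shift (shiftRow : List Int) : Prop := 4 ≤ shiftRow.length
instance (shiftRow : List Int) : Decidable (Pre_shift shiftRow) := by unfold Pre_shift; infer_instance
def pvWitness_shift : List Int := [0, 2, 0, 2]

def Spec_shift (shiftRow : List Int) (out : List Int) : Prop := out = shift_alt shiftRow
instance (shiftRow : List Int) (out : List Int) : Decidable (Spec_shift shiftRow out) := by unfold Spec_shift; infer_instance

-- ===== CLAIM (what is proved, stated in full; the proofs are below) =====
def Claim_equal_shift : Prop := ∀ (shiftRow : List Int), Dom_shift shiftRow → Pre_shift shiftRow → Spec_shift shiftRow (shift shiftRow)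

-- ===== LEMMAS AND PROOFS =====

-- Evaluating both ports on an explicit four-element prefix agrees, by cases on which entries are zero.
theorem shift_eq_alt_cons (a b c d : Int) (rest : List Int) :
    shift (a :: b :: c :: d :: rest) = shift_alt (a :: b :: c :: d :: rest) := by
  have hsl : PySem.List.slice (a :: b :: c :: d :: rest) none (some 4) = [a, b, c, d] := by
    rw [PySem.List.slice_to (a :: b :: c :: d :: rest) (by norm_num)]; rfl
  have hr : PySem.List.pyRange 0 4 1 = [0, 1, 2, 3] := by decide
  have h0 : PySem.List.pyRange 0 0 1 = [] := by decide
  have h1 : PySem.List.pyRange 0 1 1 = [0] := by decide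
  have h2 : PySem.List.pyRange 0 2 1 = [0, 1] := by decide
  have h3 : PySem.List.pyRange 0 3 1 = [0, 1, 2] := by decide
  have halt : shift_alt (a :: b :: c :: d :: rest)
      = List.foldl (fun acc x => PySem.List.insertBy
          (fun u v => decide (decide (u = 0) < decide (v = 0))) x acc) [] [a, b, c, d] := by
    simp [shift_alt, hsl, PySem.List.sorted_eq_foldl_insertBy]
  rw [halt]
  by_cases ha : a = 0 <;> by_cases hb : b = 0 <;> by_cases hc : c = 0 <;> by_cases hd : d = 0 <;>
    simp [shift, hr, h0, h1, h2, h3, PySem.List.pyGetD_ofNat',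
      PySem.List.insertBy, Bool.lt_iff, ha, hb, hc, hd]

-- ===== VERDICT (by name: the statement is the Claim_ definition above) =====
theorem shift_spec : Claim_equal_shift := by
  intro xs _ hpre
  unfold Spec_shift
  match xs, hpre with
  | a :: b :: c :: d :: rest, _ => exact shift_eq_alt_cons a b c d rest
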